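-- pv_equiv track=rewrite | github.com/vaibhav2800/forge | old/money-trail-text-ui/util/textui/account.py | select_category
-- ===== SOURCE A (Python) =====
-- def select_category(categories, user_input):
--     '''Selects a category from the list of Rows, or returns None.
--
--     If the user input is a valid index into the list of categories,
--     that category is returned. Otherwise the input is treated as a substring
--     of a category name. If a single category name contains that input,
--     that category is returned, else None is returned.
--     '''
--     if user_input.isnumeric():
--         idx = int(user_input) - 1
--         if 0 <= idx and idx < len(categories):
--             return categories[idx]
--
--     substr = user_input.lower()
--     matches = [categ for categ in categories if
--             (categ['name'].lower().find(substr) != -1)]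
--
--     if len(matches) == 1:
--         return matches[0]
--
--     for match in matches:
--         if match['name'].lower() == substr:
--             return match
--
--     return None
-- ===== SOURCE B (Python) =====
-- def select_category(categories, user_input):
--     if user_input.isnumeric():
--         idx = int(user_input) - 1
--         if 0 <= idx and idx < len(categories):
--             return categories[idx]
--
--     substr = user_input.lower()
--     count = 0
--     first = None
--     exact = None
--     for categ in categories:
--         low = categ['name'].lower()
--         if substr in low:
--             count += 1
--             if first is None:
--                 first = categ
--             if exact is None and low == substr:
--                 exact = categ
--     if count == 1:
--         return first
--     return exact
-- ===== Notes on version B (the rewrite author's own statement) =====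
-- stated objective: alternative
-- what changed: B replaces A's matches-list comprehension plus re-scan (length test, then a second loop for an exact name) by one fold over categories maintaining a match count, the first substring match and the first exact-name match, deciding from those three after the loop.
import Mathlib
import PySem

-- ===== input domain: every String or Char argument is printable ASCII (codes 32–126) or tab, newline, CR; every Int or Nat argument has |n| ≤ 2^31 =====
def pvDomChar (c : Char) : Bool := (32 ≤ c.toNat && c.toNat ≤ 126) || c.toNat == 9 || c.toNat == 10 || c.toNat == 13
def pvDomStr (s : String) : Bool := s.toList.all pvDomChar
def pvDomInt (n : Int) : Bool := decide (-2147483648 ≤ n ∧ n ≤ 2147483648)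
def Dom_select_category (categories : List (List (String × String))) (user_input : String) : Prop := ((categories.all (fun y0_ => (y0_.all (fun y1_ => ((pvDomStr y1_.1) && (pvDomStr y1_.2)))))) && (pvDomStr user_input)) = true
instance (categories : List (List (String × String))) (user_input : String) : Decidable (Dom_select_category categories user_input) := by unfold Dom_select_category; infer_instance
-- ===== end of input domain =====

-- B replaces the matches-list-then-rescan shape of A by a single fold keeping (count, first substring match, first exact match); same cost, different decomposition.

-- ===== PORT A =====
-- categ['name']; Pre_ guarantees the key is present, so getD's default is unreachable on admitted inputs
def pvName (c : List (String × String)) : String :=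
  ((PySem.Dict.mk c).get? "name").getD ""

def select_category (categories : List (List (String × String))) (user_input : String) : Option (List (String × String)) :=
  -- on the printable-ASCII domain str.isnumeric() coincides with str.isdigit() = PySem.Str.strIsdigit
  let numeric : Option (List (String × String)) :=
    if PySem.Str.strIsdigit user_input then
      -- int(user_input) cannot fail on an all-digit nonempty string, so getD's default is unreachable
      let idx : Int := (PySem.Int.ofStr? user_input).getD 0 - 1
      if 0 ≤ idx ∧ idx < (categories.length : Int) then PySem.List.pyGet? categories idx
      else none
    else none
  match numeric with
  | some c => some c
  | none =>
    let substr := PySem.Str.lower user_input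
    let ms := categories.filter (fun c => PySem.Str.find (PySem.Str.lower (pvName c)) substr != -1)
    if ms.length == 1 then PySem.List.pyGet? ms 0
    else ms.find? (fun c => PySem.Str.lower (pvName c) == substr)

-- ===== PORT B =====
-- one step of B's single loop: state = (count, first substring match, first exact-name match)
def pvScan (substr : String)
    (st : Int × Option (List (String × String)) × Option (List (String × String)))
    (c : List (String × String)) :
    Int × Option (List (String × String)) × Option (List (String × String)) :=
  let low := PySem.Str.lower (pvName c)
  if PySem.Str.isIn substr low then
    (st.1 + 1,
     st.2.1.orElse (fun _ => some c),
     if st.2.2.isNone && (low == substr) then some c else st.2.2)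
  else st

def select_category_alt (categories : List (List (String × String))) (user_input : String) : Option (List (String × String)) :=
  let numeric : Option (List (String × String)) :=
    if PySem.Str.strIsdigit user_input then
      let idx : Int := (PySem.Int.ofStr? user_input).getD 0 - 1
      if 0 ≤ idx ∧ idx < (categories.length : Int) then PySem.List.pyGet? categories idx
      else none
    else none
  match numeric with
  | some c => some c
  | none =>
    let substr := PySem.Str.lower user_input
    let st := categories.foldl (pvScan substr) (0, none, none)
    if st.1 == 1 then st.2.1 else st.2.2

-- ===== PRECONDITION & SPEC =====
-- Pre_ excludes exactly the inputs where Python A raises KeyError: a category dict without a 'name' key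
-- that the substring pass reaches (B raises there too).
def Pre_select_category (categories : List (List (String × String))) (user_input : String) : Prop :=
  ∀ c ∈ categories, (PySem.Dict.mk c).contains "name" = true
instance (categories : List (List (String × String))) (user_input : String) : Decidable (Pre_select_category categories user_input) := by unfold Pre_select_category; infer_instance
def pvWitness_select_category : (List (List (String × String))) × String :=
  ([[("name", "Food")], [("name", "Bar")]], "foo")

def Spec_select_category (categories : List (List (String × String))) (user_input : String) (out : Option (List (String × String))) : Prop := out = select_category_alt categories user_input
instance (categories : List (List (String × String))) (user_input : String) (out : Option (List (String × String))) : Decidable (Spec_select_category categories user_input out) := by unfold Spec_select_category; infer_instance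

-- ===== CLAIM (what is proved, stated in full; the proofs are below) =====
def Claim_equal_select_category : Prop := ∀ (categories : List (List (String × String))) (user_input : String), Dom_select_category categories user_input → Pre_select_category categories user_input → Spec_select_category categories user_input (select_category categories user_input)

-- ===== LEMMAS AND PROOFS =====

-- the two substring tests agree: find(sub) != -1  ==  sub in s
theorem pvFind_eq_isIn (s sub : String) :
    (PySem.Str.find s sub != -1) = PySem.Str.isIn sub s := by
  simp only [PySem.Str.find_eq, PySem.Str.isIn_eq]
  by_cases h : sub.toList <:+: s.toList
  · have h1 : PySem.Chars.find s.toList sub.toList ≠ -1 := (PySem.Chars.find_ne_neg_one_iff _ _).mpr h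
    have h2 : PySem.Chars.isIn sub.toList s.toList = true := (PySem.Chars.isIn_iff_infix _ _).mpr h
    simp [h1, h2, bne]
  · have h1 : PySem.Chars.find s.toList sub.toList = -1 := (PySem.Chars.find_eq_neg_one_iff _ _).mpr h
    have h2 : PySem.Chars.isIn sub.toList s.toList = false := (PySem.Chars.isIn_eq_false_iff _ _).mpr h
    simp [h1, h2]

-- invariant of B's fold, for arbitrary starting state
theorem pvScan_foldl (substr : String) (cs : List (List (String × String)))
    (cnt : Int) (first exact : Option (List (String × String))) :
    cs.foldl (pvScan substr) (cnt, first, exact) =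
      (cnt + ((cs.filter (fun c => PySem.Str.isIn substr (PySem.Str.lower (pvName c)))).length : Int),
       first.orElse (fun _ => (cs.filter (fun c => PySem.Str.isIn substr (PySem.Str.lower (pvName c)))).head?),
       exact.orElse (fun _ => cs.find? (fun c =>
         PySem.Str.isIn substr (PySem.Str.lower (pvName c)) && (PySem.Str.lower (pvName c) == substr)))) := by
  induction cs generalizing cnt first exact with
  | nil => cases first <;> cases exact <;> simp [Option.orElse]
  | cons c cs ih =>
    simp only [List.foldl_cons, pvScan]
    by_cases h : PySem.Str.isIn substr (PySem.Str.lower (pvName c)) = true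
    · rw [if_pos h, ih]
      simp only [PySem.Str.isIn_eq, PySem.Str.toList_lower] at h
      by_cases hq : (PySem.Str.lower (pvName c) == substr) = true <;>
        cases first <;> cases exact <;>
        simp [h, hq, List.filter_cons, List.find?_cons, Option.orElse] <;> try omega
    · rw [if_neg h, ih]
      simp only [Bool.not_eq_true, PySem.Str.isIn_eq, PySem.Str.toList_lower] at h
      cases first <;> cases exact <;>
        simp [h, List.filter_cons, List.find?_cons, Option.orElse]

-- find? of a predicate over a filter = find? of the conjunction
theorem pvFind?_filter {α : Type} (p q : α → Bool) (l : List α) :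
    (l.filter p).find? q = l.find? (fun a => p a && q a) := by
  induction l with
  | nil => simp
  | cons x l ih =>
    by_cases hp : p x = true
    · by_cases hq : q x = true <;> simp [List.filter_cons, List.find?_cons, hp, hq, ih]
    · simp only [Bool.not_eq_true] at hp
      simp [List.filter_cons, List.find?_cons, hp, ih]

-- the non-numeric tails of the two ports agree
theorem pvTail_eq (substr : String) (cs : List (List (String × String))) :
    (let ms := cs.filter (fun c => PySem.Str.find (PySem.Str.lower (pvName c)) substr != -1);
     if ms.length == 1 then PySem.List.pyGet? ms 0
     else ms.find? (fun c => PySem.Str.lower (pvName c) == substr))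
    = (let st := cs.foldl (pvScan substr) (0, none, none);
       if st.1 == 1 then st.2.1 else st.2.2) := by
  have hfe : cs.filter (fun c => PySem.Str.find (PySem.Str.lower (pvName c)) substr != -1)
      = cs.filter (fun c => PySem.Str.isIn substr (PySem.Str.lower (pvName c))) := by
    apply List.filter_congr
    intro c _
    exact pvFind_eq_isIn _ _
  simp only [hfe, pvScan_foldl, Option.orElse, zero_add]
  by_cases hlen : (cs.filter (fun c => PySem.Str.isIn substr (PySem.Str.lower (pvName c)))).length = 1
  · obtain ⟨x, hx⟩ := List.length_eq_one_iff.mp hlen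
    rw [hx]
    have h1 : (([x] : List (List (String × String))).length == 1) = true := by rfl
    have h2 : ((([x] : List (List (String × String))).length : Int) == 1) = true := by rfl
    simp only [h1, h2, if_true]
    rfl
  · have h1 : ((cs.filter (fun c => PySem.Str.isIn substr (PySem.Str.lower (pvName c)))).length == 1) = false :=
      beq_eq_false_iff_ne.mpr hlen
    have h2 : (((cs.filter (fun c => PySem.Str.isIn substr (PySem.Str.lower (pvName c)))).length : Int) == 1) = false := by
      simp only [beq_eq_false_iff_ne, ne_eq]
      omega
    simp only [h1, h2, Bool.false_eq_true, if_false]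
    rw [pvFind?_filter]

theorem pvPorts_eq (categories : List (List (String × String))) (user_input : String) :
    select_category categories user_input = select_category_alt categories user_input := by
  unfold select_category select_category_alt
  cases hnum : (if PySem.Str.strIsdigit user_input then
      let idx : Int := (PySem.Int.ofStr? user_input).getD 0 - 1
      if 0 ≤ idx ∧ idx < (categories.length : Int) then PySem.List.pyGet? categories idx
      else none
    else none) with
  | some c => simp
  | none => simpa [hnum] using pvTail_eq (PySem.Str.lower user_input) categories

-- ===== VERDICT (by name: the statement is the Claim_ definition above) =====
theorem select_category_spec : Claim_equal_select_category := by
  intro categories user_input _ _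
  exact pvPorts_eq categories user_input
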